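-- pv_equiv track=rewrite | github.com/rocyax/SOTA-Algorithm-Benchmarks | (RE)(Web)doubao Expert.py | compute
-- ===== SOURCE A (Python) =====
-- MOD = 10**9 + 7
--
-- memo = {}
--
-- def compute(n):
--     if n in memo:
--         return memo[n]
--     if n == 0:
--         return (0, 0)
--     if n == 1:
--         return (1, 1)
--     if n % 2 == 1:
--         k = (n - 1) // 2
--         s_2k, a_2k = compute(2 * k)
--         s_n = (s_2k + 2 * a_2k) % MOD
--         a_n = (2 * a_2k) % MOD
--         memo[n] = (s_n, a_n)
--         return (s_n, a_n)
--     else: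
--         k = n // 2
--         s_k, a_k = compute(k)
--         if k == 1:
--             s_2k = 3
--             a_2k = 2
--         elif k == 2:
--             s_2k = 15
--             a_2k = 8
--         elif k == 3:
--             s_2k = 52
--             a_2k = 21
--         else:
--             s_2k_prev, a_2k_prev = compute(2 * (k - 1))
--             s_k_prev, a_k_prev = compute(k - 1)
--             a_2k = (2 * a_2k_prev + (a_k - a_k_prev)) % MOD
--             s_2k = (s_2k_prev + 4 * a_2k_prev + (a_k - a_k_prev)) % MOD
--         memo[n] = (s_2k, a_2k)
--         return (s_2k, a_2k)
-- ===== SOURCE B (Python) =====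
-- MOD = 10**9 + 7
--
-- def compute(n):
--     # Iterative bottom-up DP: fill tables s[i], a[i] for i = 0..n in one
--     # forward pass; every dependency of index i is a smaller index.
--     s = []
--     a = []
--     for i in range(n + 1):
--         if i == 0:
--             si, ai = 0, 0
--         elif i == 1:
--             si, ai = 1, 1
--         elif i % 2 == 1:
--             si = (s[i - 1] + 2 * a[i - 1]) % MOD
--             ai = (2 * a[i - 1]) % MOD
--         else:
--             k = i // 2
--             if k == 1:
--                 si, ai = 3, 2
--             elif k == 2:
--                 si, ai = 15, 8
--             elif k == 3:
--                 si, ai = 52, 21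
--             else:
--                 d = a[k] - a[k - 1]
--                 si = (s[i - 2] + 4 * a[i - 2] + d) % MOD
--                 ai = (2 * a[i - 2] + d) % MOD
--         s.append(si)
--         a.append(ai)
--     return (s[n], a[n])
-- ===== Notes on version B (the rewrite author's own statement) =====
-- stated objective: alternative
-- what changed: Replaced the top-down memoized recursion (with a module-global memo dict) by an iterative bottom-up DP that fills dict tables s[i], a[i] for i = 0..n in one forward pass and returns the stored pair for n.
import Mathlib
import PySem

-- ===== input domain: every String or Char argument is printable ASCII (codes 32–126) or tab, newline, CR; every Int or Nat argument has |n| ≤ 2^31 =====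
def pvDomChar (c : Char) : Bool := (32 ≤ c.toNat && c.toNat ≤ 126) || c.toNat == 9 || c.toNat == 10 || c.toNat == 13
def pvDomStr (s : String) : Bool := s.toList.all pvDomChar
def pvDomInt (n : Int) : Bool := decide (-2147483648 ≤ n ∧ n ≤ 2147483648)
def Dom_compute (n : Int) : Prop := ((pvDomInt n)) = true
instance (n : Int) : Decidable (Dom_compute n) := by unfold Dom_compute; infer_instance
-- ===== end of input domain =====

-- B replaces A's top-down memoized recursion by an iterative bottom-up DP that fills
-- two tables s[i], a[i] for i = 0..n in one forward pass; equivalence is about the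
-- return value (A also mutates its module-global memo, which never changes any
-- return value it produces).

def pvMOD : Int := 10 ^ 9 + 7

-- ===== PORT A =====
-- A's memoized recursion. The memo (a Python dict of int keys) is ported as a
-- Std.HashMap threaded through the recursion; the fuel argument n+1 only makes the
-- recursion structural (every recursive call strictly decreases the argument, so
-- the 0-fuel branch is never reached on the inputs admitted by Pre_).
def computeM : Nat → Int → Std.HashMap Int (Int × Int) → (Int × Int) × Std.HashMap Int (Int × Int)
  | 0, _, memo => ((0, 0), memo)
  | fuel + 1, n, memo =>
    match memo[n]? with
    | some v => (v, memo)
    | none =>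
      if n = 0 then ((0, 0), memo)
      else if n = 1 then ((1, 1), memo)
      else if PySem.Int.mod n 2 = 1 then
        let k := PySem.Int.floordiv (n - 1) 2
        let r := computeM fuel (2 * k) memo
        let s_n := PySem.Int.mod (r.1.1 + 2 * r.1.2) pvMOD
        let a_n := PySem.Int.mod (2 * r.1.2) pvMOD
        ((s_n, a_n), r.2.insert n (s_n, a_n))
      else
        let k := PySem.Int.floordiv n 2
        let rk := computeM fuel k memo
        if k = 1 then ((3, 2), rk.2.insert n (3, 2))
        else if k = 2 then ((15, 8), rk.2.insert n (15, 8))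
        else if k = 3 then ((52, 21), rk.2.insert n (52, 21))
        else
          let rp := computeM fuel (2 * (k - 1)) rk.2
          let rq := computeM fuel (k - 1) rp.2
          let a_2k := PySem.Int.mod (2 * rp.1.2 + (rk.1.2 - rq.1.2)) pvMOD
          let s_2k := PySem.Int.mod (rp.1.1 + 4 * rp.1.2 + (rk.1.2 - rq.1.2)) pvMOD
          ((s_2k, a_2k), rq.2.insert n (s_2k, a_2k))

-- A's module-global memo only ever caches values this recursion itself computes, so
-- starting each call from the empty memo yields the same return value; on negative n the
-- Python recurses forever (RecursionError), excluded by Pre_ (there the port's value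
-- is never claimed about).
def compute (n : Int) : Int × Int := (computeM (n.toNat + 1) n ∅).1

-- ===== PORT B =====
-- one loop-body step of Source B, acting on the pair of tables (s, a) at index i;
-- Python lists with append / O(1) indexing are ported as Arrays (push / getD).
-- Every index read inside the loop is nonnegative and in range, so `.toNat` + getD
-- is exact there (Python's IndexError is unreachable inside the loop).
def stepB (st : Array Int × Array Int) (i : Int) : Array Int × Array Int :=
  let s := st.1
  let a := st.2
  let v :=
    if i = 0 then ((0 : Int), (0 : Int))
    else if i = 1 then (1, 1)
    else if PySem.Int.mod i 2 = 1 then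
      (PySem.Int.mod (s.getD (i - 1).toNat 0 + 2 * a.getD (i - 1).toNat 0) pvMOD,
       PySem.Int.mod (2 * a.getD (i - 1).toNat 0) pvMOD)
    else
      let k := PySem.Int.floordiv i 2
      if k = 1 then (3, 2)
      else if k = 2 then (15, 8)
      else if k = 3 then (52, 21)
      else
        let d := a.getD k.toNat 0 - a.getD (k - 1).toNat 0
        (PySem.Int.mod (s.getD (i - 2).toNat 0 + 4 * a.getD (i - 2).toNat 0 + d) pvMOD,
         PySem.Int.mod (2 * a.getD (i - 2).toNat 0 + d) pvMOD)
  (s.push v.1, a.push v.2)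

-- on negative n the final table reads raise IndexError in Python (empty tables): those
-- inputs are excluded by Pre_, so the getD default is never claimed about.
def compute_alt (n : Int) : Int × Int :=
  let st := (PySem.List.pyRange 0 (n + 1) 1).foldl stepB (#[], #[])
  (st.1.getD n.toNat 0, st.2.getD n.toNat 0)

-- ===== PRECONDITION & SPEC =====
-- Pre_ excludes negative n, on which A recurses forever (RecursionError) and B raises IndexError.
def Pre_compute (n : Int) : Prop := 0 ≤ n
instance (n : Int) : Decidable (Pre_compute n) := by unfold Pre_compute; infer_instance
def pvWitness_compute : Int := (6)

def Spec_compute (n : Int) (out : Int × Int) : Prop := out = compute_alt n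
instance (n : Int) (out : Int × Int) : Decidable (Spec_compute n out) := by unfold Spec_compute; infer_instance

-- ===== CLAIM (what is proved, stated in full; the proofs are below) =====
def Claim_equal_compute : Prop := ∀ (n : Int), Dom_compute n → Pre_compute n → Spec_compute n (compute n)

-- ===== LEMMAS AND PROOFS =====

-- proof-only reference recurrence: A's recursion on Nat, without the memo
def computeRec : Nat → Nat → Int × Int
  | 0, _ => (0, 0)
  | fuel + 1, n =>
    if n = 0 then (0, 0)
    else if n = 1 then (1, 1)
    else if n % 2 = 1 then
      let p := computeRec fuel (n - 1)
      (PySem.Int.mod (p.1 + 2 * p.2) pvMOD, PySem.Int.mod (2 * p.2) pvMOD)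
    else
      let k := n / 2
      if k = 1 then (3, 2)
      else if k = 2 then (15, 8)
      else if k = 3 then (52, 21)
      else
        let pk := computeRec fuel k
        let pprev := computeRec fuel (n - 2)
        let pkprev := computeRec fuel (k - 1)
        (PySem.Int.mod (pprev.1 + 4 * pprev.2 + (pk.2 - pkprev.2)) pvMOD,
         PySem.Int.mod (2 * pprev.2 + (pk.2 - pkprev.2)) pvMOD)

lemma computeRec_fuel (n : Nat) : ∀ f g : Nat, n < f → n < g → computeRec f n = computeRec g n := by
  induction n using Nat.strong_induction_on with
  | _ n ih =>
    intro f g hf hg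
    match f, g with
    | f + 1, g + 1 =>
      simp only [computeRec]
      by_cases h0 : n = 0
      · rw [if_pos h0, if_pos h0]
      rw [if_neg h0, if_neg h0]
      by_cases h1 : n = 1
      · rw [if_pos h1, if_pos h1]
      rw [if_neg h1, if_neg h1]
      by_cases hodd : n % 2 = 1
      · rw [if_pos hodd, if_pos hodd]
        rw [ih (n - 1) (by omega) f g (by omega) (by omega)]
      · rw [if_neg hodd, if_neg hodd]
        by_cases hk1 : n / 2 = 1
        · rw [if_pos hk1, if_pos hk1]
        rw [if_neg hk1, if_neg hk1]
        by_cases hk2 : n / 2 = 2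
        · rw [if_pos hk2, if_pos hk2]
        rw [if_neg hk2, if_neg hk2]
        by_cases hk3 : n / 2 = 3
        · rw [if_pos hk3, if_pos hk3]
        rw [if_neg hk3, if_neg hk3]
        rw [ih (n / 2) (by omega) f g (by omega) (by omega),
            ih (n - 2) (by omega) f g (by omega) (by omega),
            ih (n / 2 - 1) (by omega) f g (by omega) (by omega)]

-- the canonical (fuel-saturated) value of the recurrence
def cR (n : Nat) : Int × Int := computeRec (n + 1) n

lemma cR_eq (f n : Nat) (h : n < f) : computeRec f n = cR n :=
  computeRec_fuel n f (n + 1) h (Nat.lt_succ_self n)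

-- one-step evaluation facts about the recurrence, one per branch
lemma cR_zero : cR 0 = (0, 0) := by decide

lemma cR_one : cR 1 = (1, 1) := by decide

lemma cR_odd (n : Nat) (h2 : 2 ≤ n) (hodd : n % 2 = 1) :
    cR n =
      (PySem.Int.mod ((cR (n - 1)).1 + 2 * (cR (n - 1)).2) pvMOD,
       PySem.Int.mod (2 * (cR (n - 1)).2) pvMOD) := by
  show computeRec (n + 1) n = _
  simp only [computeRec]
  rw [if_neg (by omega), if_neg (by omega), if_pos hodd, cR_eq n (n - 1) (by omega)]

lemma cR_two : cR 2 = (3, 2) := by decide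

lemma cR_four : cR 4 = (15, 8) := by decide

lemma cR_six : cR 6 = (52, 21) := by decide

lemma cR_even_big (n : Nat) (h8 : 8 ≤ n) (heven : n % 2 = 0) :
    cR n =
      (PySem.Int.mod ((cR (n - 2)).1 + 4 * (cR (n - 2)).2 +
         ((cR (n / 2)).2 - (cR (n / 2 - 1)).2)) pvMOD,
       PySem.Int.mod (2 * (cR (n - 2)).2 +
         ((cR (n / 2)).2 - (cR (n / 2 - 1)).2)) pvMOD) := by
  show computeRec (n + 1) n = _
  simp only [computeRec]
  rw [if_neg (by omega), if_neg (by omega), if_neg (by omega), if_neg (by omega),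
      if_neg (by omega), if_neg (by omega),
      cR_eq n (n / 2) (by omega), cR_eq n (n - 2) (by omega), cR_eq n (n / 2 - 1) (by omega)]

-- ===== A-side: the memoized recursion computes cR =====

-- a coherent memo only holds correct cached values at nonnegative keys
def Coh (memo : Std.HashMap Int (Int × Int)) : Prop :=
  ∀ (k : Int) (v : Int × Int), memo[k]? = some v → 0 ≤ k ∧ v = cR k.toNat

lemma coh_insert (memo : Std.HashMap Int (Int × Int)) (n : Int) (hn : 0 ≤ n)
    (v : Int × Int) (hv : v = cR n.toNat) (h : Coh memo) : Coh (memo.insert n v) := by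
  intro k w hw
  rw [Std.HashMap.getElem?_insert] at hw
  by_cases hk : n == k
  · rw [if_pos hk] at hw
    obtain rfl : v = w := by simpa using hw
    obtain rfl : n = k := by simpa using hk
    exact ⟨hn, hv⟩
  · rw [if_neg hk] at hw
    exact h k w hw

lemma computeM_spec : ∀ (fuel : Nat) (n : Int) (memo : Std.HashMap Int (Int × Int)),
    0 ≤ n → n.toNat < fuel → Coh memo →
    (computeM fuel n memo).1 = cR n.toNat ∧ Coh (computeM fuel n memo).2 := by
  intro fuel
  induction fuel with
  | zero => intro n memo hn hf; omega
  | succ fuel ih =>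
    intro n memo hn hf hcoh
    simp only [computeM]
    cases hmem : memo[n]? with
    | some v =>
        obtain ⟨_, hv⟩ := hcoh n v hmem
        simp [hv, hcoh]
    | none =>
      simp only []
      have hmod : PySem.Int.mod n 2 = n % 2 := PySem.Int.mod_eq_emod_of_pos (by norm_num)
      by_cases h0 : n = 0
      · subst h0; simp [cR_zero, hcoh]
      rw [if_neg h0]
      by_cases h1 : n = 1
      · subst h1; simp [cR_one, hcoh]
      rw [if_neg h1, hmod]
      by_cases hodd : n % 2 = 1
      · -- odd branch: recursion on 2*k = n - 1
        rw [if_pos hodd]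
        have hk : 2 * PySem.Int.floordiv (n - 1) 2 = n - 1 := by
          rw [PySem.Int.floordiv_eq_ediv_of_pos (by norm_num)]; omega
        rw [hk]
        obtain ⟨hv, hc⟩ := ih (n - 1) memo (by omega) (by omega) hcoh
        have ht : (n - 1).toNat = n.toNat - 1 := by omega
        rw [cR_odd n.toNat (by omega) (by omega), ← ht, ← hv]
        exact ⟨rfl, coh_insert _ n hn _ (by rw [cR_odd n.toNat (by omega) (by omega), ← ht, ← hv]) hc⟩
      · -- even branch: k = n / 2
        rw [if_neg hodd]
        have hk : PySem.Int.floordiv n 2 = n / 2 := PySem.Int.floordiv_eq_ediv_of_pos (by norm_num)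
        have hne : n % 2 = 0 := by omega
        rw [hk]
        obtain ⟨hvk, hck⟩ := ih (n / 2) memo (by omega) (by omega) hcoh
        by_cases hk1 : n / 2 = 1
        · have h2 : n.toNat = 2 := by omega
          rw [if_pos hk1]
          exact ⟨by rw [h2, cR_two], coh_insert _ n hn _ (by rw [h2, cR_two]) hck⟩
        rw [if_neg hk1]
        by_cases hk2 : n / 2 = 2
        · have h4 : n.toNat = 4 := by omega
          rw [if_pos hk2]
          exact ⟨by rw [h4, cR_four], coh_insert _ n hn _ (by rw [h4, cR_four]) hck⟩
        rw [if_neg hk2]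
        by_cases hk3 : n / 2 = 3
        · have h6 : n.toNat = 6 := by omega
          rw [if_pos hk3]
          exact ⟨by rw [h6, cR_six], coh_insert _ n hn _ (by rw [h6, cR_six]) hck⟩
        rw [if_neg hk3]
        -- general even case: k ≥ 4, n ≥ 8
        have h8 : 8 ≤ n := by omega
        have hprev : 2 * (n / 2 - 1) = n - 2 := by omega
        rw [hprev]
        obtain ⟨hvp, hcp⟩ := ih (n - 2) (computeM fuel (n / 2) memo).2 (by omega) (by omega) hck
        obtain ⟨hvq, hcq⟩ := ih (n / 2 - 1) (computeM fuel (n - 2) (computeM fuel (n / 2) memo).2).2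
          (by omega) (by omega) hcp
        have t1 : (n - 2).toNat = n.toNat - 2 := by omega
        have t2 : (n / 2).toNat = n.toNat / 2 := by omega
        have t3 : (n / 2 - 1).toNat = n.toNat / 2 - 1 := by omega
        have hval : cR n.toNat =
            (PySem.Int.mod ((computeM fuel (n - 2) (computeM fuel (n / 2) memo).2).1.1 +
               4 * (computeM fuel (n - 2) (computeM fuel (n / 2) memo).2).1.2 +
               ((computeM fuel (n / 2) memo).1.2 -
                (computeM fuel (n / 2 - 1) (computeM fuel (n - 2) (computeM fuel (n / 2) memo).2).2).1.2)) pvMOD,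
             PySem.Int.mod (2 * (computeM fuel (n - 2) (computeM fuel (n / 2) memo).2).1.2 +
               ((computeM fuel (n / 2) memo).1.2 -
                (computeM fuel (n / 2 - 1) (computeM fuel (n - 2) (computeM fuel (n / 2) memo).2).2).1.2)) pvMOD) := by
          rw [cR_even_big n.toNat (by omega) (by omega), ← t1, ← t3, ← t2, hvp, hvq, hvk]
        exact ⟨hval.symm, coh_insert _ n hn _ hval.symm hcq⟩

-- ===== B-side: the forward pass fills the tables with cR =====

-- the loop state after iterating over range(m)
def stateB (m : Nat) : Array Int × Array Int :=
  (PySem.List.pyRange 0 (m : Int) 1).foldl stepB (#[], #[])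

lemma stateB_succ (m : Nat) :
    stateB (m + 1) = stepB (stateB m) (m : Int) := by
  unfold stateB
  have hc : ((m + 1 : Nat) : Int) = (m : Int) + 1 := by push_cast; ring
  rw [hc, PySem.List.pyRange_one_succ_right (by positivity), List.foldl_append]
  rfl

-- the invariant: after the loop over range(m) both tables have length m and hold cR
def InvB (m : Nat) : Prop :=
  (stateB m).1.size = m ∧ (stateB m).2.size = m ∧
  ∀ j : Nat, j < m →
    (stateB m).1[j]? = some (cR j).1 ∧ (stateB m).2[j]? = some (cR j).2

lemma getD_of_getElem? (a : Array Int) (j : Nat) (v d : Int) (h : a[j]? = some v) :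
    a.getD j d = v := by
  rcases Nat.lt_or_ge j a.size with hj | hj
  · rw [Array.getD_eq_getD_getElem?, h]; rfl
  · rw [Array.getElem?_eq_none hj] at h; cases h

lemma invB_succ (m : Nat) (h : InvB m) : InvB (m + 1) := by
  obtain ⟨hs, ha, hget⟩ := h
  -- the value the body computes at index m is cR m
  have hval : (stepB (stateB m) (m : Int)) =
      ((stateB m).1.push (cR m).1, (stateB m).2.push (cR m).2) := by
    unfold stepB
    dsimp only
    have hmod : PySem.Int.mod (m : Int) 2 = ((m % 2 : Nat) : Int) := by
      exact_mod_cast PySem.Int.mod_natCast m 2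
    have hdiv : PySem.Int.floordiv (m : Int) 2 = ((m / 2 : Nat) : Int) := by
      exact_mod_cast PySem.Int.floordiv_natCast m 2
    by_cases h0 : m = 0
    · subst h0; rw [if_pos (by norm_num), cR_zero]
    rw [if_neg (by omega)]
    by_cases h1 : m = 1
    · subst h1; rw [if_pos (by norm_num), cR_one]
    rw [if_neg (by omega), hmod]
    by_cases hodd : m % 2 = 1
    · -- odd index: reads position m - 1
      rw [if_pos (by exact_mod_cast hodd)]
      have hto : ((m : Int) - 1).toNat = m - 1 := by omega
      obtain ⟨g1, g2⟩ := hget (m - 1) (by omega)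
      rw [hto, getD_of_getElem? _ _ _ _ g1, getD_of_getElem? _ _ _ _ g2,
          cR_odd m (by omega) hodd]
    · rw [if_neg (by exact_mod_cast hodd), hdiv]
      by_cases hk1 : m / 2 = 1
      · have h2 : m = 2 := by omega
        subst h2
        rw [if_pos (by norm_num), cR_two]
      rw [if_neg (by exact_mod_cast hk1)]
      by_cases hk2 : m / 2 = 2
      · have h4 : m = 4 := by omega
        subst h4
        rw [if_pos (by norm_num), cR_four]
      rw [if_neg (by exact_mod_cast hk2)]
      by_cases hk3 : m / 2 = 3
      · have h6 : m = 6 := by omega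
        subst h6
        rw [if_pos (by norm_num), cR_six]
      rw [if_neg (by exact_mod_cast hk3)]
      -- general even case: reads positions m/2, m/2 - 1 and m - 2
      have t1 : ((m / 2 : Nat) : Int).toNat = m / 2 := by omega
      have t2 : (((m / 2 : Nat) : Int) - 1).toNat = m / 2 - 1 := by omega
      have t3 : ((m : Int) - 2).toNat = m - 2 := by omega
      obtain ⟨gk1, gk2⟩ := hget (m / 2) (by omega)
      obtain ⟨gp1, gp2⟩ := hget (m / 2 - 1) (by omega)
      obtain ⟨gm1, gm2⟩ := hget (m - 2) (by omega)
      rw [t1, t2, t3, getD_of_getElem? _ _ _ _ gk2, getD_of_getElem? _ _ _ _ gp2,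
          getD_of_getElem? _ _ _ _ gm1, getD_of_getElem? _ _ _ _ gm2,
          cR_even_big m (by omega) (by omega)]
  refine ⟨?_, ?_, ?_⟩
  · rw [stateB_succ, hval]; simp [hs]
  · rw [stateB_succ, hval]; simp [ha]
  · intro j hj
    rw [stateB_succ, hval]
    rcases Nat.lt_succ_iff_lt_or_eq.mp hj with hlt | rfl
    · constructor <;> simp only [Array.getElem?_push] <;>
        rw [if_neg (by omega)] <;> [exact (hget j hlt).1; exact (hget j hlt).2]
    · constructor <;> simp only [Array.getElem?_push] <;>
        rw [if_pos (by omega)]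

lemma invB (m : Nat) : InvB m := by
  induction m with
  | zero => exact ⟨rfl, rfl, fun j hj => absurd hj (Nat.not_lt_zero j)⟩
  | succ m ih => exact invB_succ m ih

theorem compute_spec_aux (n : Nat) : cR n = compute_alt (n : Int) := by
  obtain ⟨-, -, hget⟩ := invB (n + 1)
  obtain ⟨h1, h2⟩ := hget n (Nat.lt_succ_self n)
  have hc : ((n : Int) + 1) = ((n + 1 : Nat) : Int) := by push_cast; ring
  simp only [compute_alt]
  rw [hc]
  have e : (PySem.List.pyRange 0 ((n + 1 : Nat) : Int) 1).foldl stepB (#[], #[]) = stateB (n + 1) := rfl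
  rw [e, show ((n : Int)).toNat = n from by omega,
      getD_of_getElem? _ _ _ _ h1, getD_of_getElem? _ _ _ _ h2]

-- ===== VERDICT (by name: the statement is the Claim_ definition above) =====
theorem compute_spec : Claim_equal_compute := by
  intro n _ hpre
  have hpre' : 0 ≤ n := hpre
  show compute n = compute_alt n
  have hA := computeM_spec (n.toNat + 1) n ∅ hpre' (Nat.lt_succ_self _)
    (fun k v h => by simp at h)
  have hB := compute_spec_aux n.toNat
  rw [show ((n.toNat : Nat) : Int) = n from by omega] at hB
  rw [compute, hA.1, hB]
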